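-- pv_equiv track=rewrite | github.com/dhruvjwc24/TJHSST-AI-2023-2024 | AStar/astar.py | getBand
-- ===== SOURCE A (Python) =====
-- def getBand(path, w, h, bandMaxLength=12):
--     pathList = path.split(" ")
--     bandList = []
--     for i in range(0, len(pathList), bandMaxLength):
--         pathListBand = pathList[i:i+bandMaxLength]
--         twoDList = []
--         band = ""
--         for state in pathListBand:
--             twoDList.append(create2D(state, w, h))
--         zipped = list(zip(*twoDList))
--         for i, tup in enumerate(zipped):
--             band += " ".join(tup) + "\n"
--         bandList.append(band)
--     return "\n".join(bandList)
--
-- def create2D(state, w, h):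
--     return [state[w*i:w*(i+1)] for i in range(h)]
-- ===== SOURCE B (Python) =====
-- def getBand(path, w, h, bandMaxLength=12):
--     # One streaming pass: distribute each state's row-slices into h row buffers,
--     # flushing a finished band whenever the buffer holds bandMaxLength states.
--     bands = []
--     rows = [[] for _ in range(h)]
--     cnt = 0
--     for state in path.split(" "):
--         if cnt == bandMaxLength:
--             bands.append("".join(" ".join(row) + "\n" for row in rows))
--             rows = [[] for _ in range(h)]
--             cnt = 0
--         for r in range(h):
--             rows[r].append(state[w*r:w*(r+1)])
--         cnt += 1
--     bands.append("".join(" ".join(row) + "\n" for row in rows))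
--     return "\n".join(bands)
-- ===== Notes on version B (the rewrite author's own statement) =====
-- stated objective: alternative
-- what changed: B replaces A's chunk-then-transpose pipeline (slice the word list into chunks, build a 2D grid per state, zip(*grids), join rows) by a single streaming pass that distributes each state's row-slices into h row buffers and flushes a finished band whenever the buffer holds bandMaxLength states; no chunk slicing, no per-state grids, no transpose.
-- outside the precondition, e.g. on getBand('ab cd', 1, 2, -1): A returns '', B returns 'a c\nb d\n'
import Mathlib
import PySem

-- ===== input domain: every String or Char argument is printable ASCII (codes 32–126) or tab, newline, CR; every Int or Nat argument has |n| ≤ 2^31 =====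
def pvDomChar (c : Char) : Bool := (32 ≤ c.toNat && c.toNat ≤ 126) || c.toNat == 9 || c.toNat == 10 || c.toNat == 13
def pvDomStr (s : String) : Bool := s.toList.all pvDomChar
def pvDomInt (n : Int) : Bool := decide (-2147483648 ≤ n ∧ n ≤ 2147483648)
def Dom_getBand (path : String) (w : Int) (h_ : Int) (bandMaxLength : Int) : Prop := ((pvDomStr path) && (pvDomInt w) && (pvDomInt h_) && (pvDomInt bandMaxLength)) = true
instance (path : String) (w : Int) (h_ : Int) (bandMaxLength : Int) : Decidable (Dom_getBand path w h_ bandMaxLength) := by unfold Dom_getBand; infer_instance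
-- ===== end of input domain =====

-- B replaces A's chunk-grids-and-transpose pipeline by one streaming pass that distributes each
-- state's row-slices into h row buffers and flushes a band when the buffer is full (objective:
-- alternative algorithm, same cost). Return-value equivalence on Pre_ (positive band length);
-- neither version mutates.

-- ===== PORT A =====

-- create2D(state, w, h): [state[w*i:w*(i+1)] for i in range(h)]
def create2D (state : String) (w : Int) (h : Int) : List String :=
  (PySem.List.pyRange 0 h 1).map (fun i => PySem.Str.slice state (some (w * i)) (some (w * (i + 1))))

-- faithful hand-port of Python's truncating zip(*lists): heads of all lists, or stop
def pyAllHeads : List (List String) → Option (List String)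
  | [] => some []
  | [] :: _ => none
  | (y :: _) :: rest => (pyAllHeads rest).map (y :: ·)

def pyZipAux : List String → List (List String) → List (List String)
  | [], _ => []
  | x :: xs, ls =>
    match pyAllHeads ls with
    | none => []
    | some hs => (x :: hs) :: pyZipAux xs (ls.map List.tail)

def pyZipStar : List (List String) → List (List String)
  | [] => []
  | l :: ls => pyZipAux l ls

def getBand (path : String) (w : Int) (h_ : Int) (bandMaxLength : Int) : String :=
  let pathList := (PySem.Str.split? path " ").getD []
  let bandList := (PySem.List.pyRange 0 (pathList.length : Int) bandMaxLength).foldl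
    (fun bandList i =>
      let pathListBand := PySem.List.slice pathList (some i) (some (i + bandMaxLength))
      let twoDList := pathListBand.foldl (fun acc state => acc ++ [create2D state w h_]) []
      let zipped := pyZipStar twoDList
      let band := zipped.foldl (fun band tup => band ++ PySem.Str.join " " tup ++ "\n") ""
      bandList ++ [band]) []
  PySem.Str.join "\n" bandList

-- ===== PORT B =====

-- rows = [[] for _ in range(h)]
def mkRows (h : Int) : List (List String) :=
  (PySem.List.pyRange 0 h 1).map (fun _ => ([] : List String))

-- "".join(" ".join(row) + "\n" for row in rows)
def flushRows (rows : List (List String)) : String :=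
  PySem.Str.join "" (rows.map (fun row => PySem.Str.join " " row ++ "\n"))

def getBand_alt (path : String) (w : Int) (h_ : Int) (bandMaxLength : Int) : String :=
  let acc := ((PySem.Str.split? path " ").getD []).foldl
    (fun (acc : List String × List (List String) × Int) state =>
      let acc2 := if acc.2.2 == bandMaxLength
        then (acc.1 ++ [flushRows acc.2.1], mkRows h_, (0 : Int))
        else acc
      -- for r in range(h): rows[r].append(state[w*r:w*(r+1)])  (in-place index update, ported
      -- with List.set/getD; r is always a valid index of rows, so this is exact)
      let rows3 := (PySem.List.pyRange 0 h_ 1).foldl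
        (fun rs r => rs.set r.toNat
          ((rs.getD r.toNat []) ++ [PySem.Str.slice state (some (w * r)) (some (w * (r + 1)))]))
        acc2.2.1
      (acc2.1, rows3, acc2.2.2 + 1))
    ([], mkRows h_, 0)
  PySem.Str.join "\n" (acc.1 ++ [flushRows acc.2.1])

-- ===== PRECONDITION & SPEC =====
-- Pre_ restricts to the natural domain of a positive band length: on bandMaxLength = 0 Python's
-- range(0, n, 0) raises ValueError in A, and on negative lengths range's empty step makes A
-- return "" (dropping the whole path) while B streams one unlimited band — neither value is
-- specified for a negative band length (the two agree there only when h_ ≤ 0).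
def Pre_getBand (path : String) (w : Int) (h_ : Int) (bandMaxLength : Int) : Prop :=
  1 ≤ bandMaxLength
instance (path : String) (w : Int) (h_ : Int) (bandMaxLength : Int) : Decidable (Pre_getBand path w h_ bandMaxLength) := by unfold Pre_getBand; infer_instance

def pvWitness_getBand : String × Int × Int × Int := ("ab cd ef", 1, 2, 2)

def Spec_getBand (path : String) (w : Int) (h_ : Int) (bandMaxLength : Int) (out : String) : Prop := out = getBand_alt path w h_ bandMaxLength
instance (path : String) (w : Int) (h_ : Int) (bandMaxLength : Int) (out : String) : Decidable (Spec_getBand path w h_ bandMaxLength out) := by unfold Spec_getBand; infer_instance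

-- ===== CLAIM (what is proved, stated in full; the proofs are below) =====
def Claim_equal_getBand : Prop := ∀ (path : String) (w : Int) (h_ : Int) (bandMaxLength : Int), Dom_getBand path w h_ bandMaxLength → Pre_getBand path w h_ bandMaxLength → Spec_getBand path w h_ bandMaxLength (getBand path w h_ bandMaxLength)

-- ===== LEMMAS AND PROOFS =====

theorem join_empty_nil : PySem.Str.join "" ([] : List String) = "" := by
  apply String.toList_inj.mp
  simp [PySem.Str.toList_join, PySem.Chars.join_nil]

theorem join_empty_cons (x : String) (xs : List String) :
    PySem.Str.join "" (x :: xs) = x ++ PySem.Str.join "" xs := by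
  apply String.toList_inj.mp
  cases xs with
  | nil => simp [PySem.Str.toList_join, PySem.Chars.join_singleton, PySem.Chars.join_nil]
  | cons y ys =>
    simp [PySem.Str.toList_join, PySem.Chars.join_cons_cons]

theorem foldl_str_append {α : Type} (f : α → String) (l : List α) (s : String) :
    l.foldl (fun b t => b ++ f t) s = s ++ PySem.Str.join "" (l.map f) := by
  induction l generalizing s with
  | nil => simp [join_empty_nil]
  | cons a l ih =>
    simp only [List.foldl_cons, List.map_cons, ih, join_empty_cons, String.append_assoc]

theorem foldl_append_singleton {α β : Type} (f : α → β) (l : List α) (init : List β) :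
    l.foldl (fun acc x => acc ++ [f x]) init = init ++ l.map f := by
  induction l generalizing init with
  | nil => simp
  | cons a l ih => simp [ih]

theorem pyAllHeads_map_cons (a : String → String) (t : String → List String) (ls : List String) :
    pyAllHeads (ls.map (fun s => a s :: t s)) = some (ls.map a) := by
  induction ls with
  | nil => simp [pyAllHeads]
  | cons x xs ih => simp [pyAllHeads, ih]

theorem pyZipAux_maps (g : String → Int → String) (ls : List String) (R : List Int) (l : String) :
    pyZipAux (R.map (g l)) (ls.map (fun s => R.map (g s)))
      = R.map (fun r => g l r :: ls.map (fun s => g s r)) := by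
  induction R generalizing ls with
  | nil => simp [pyZipAux]
  | cons r R ih =>
    simp only [List.map_cons, pyZipAux, pyAllHeads_map_cons, List.map_map]
    simp only [Function.comp_def, List.tail_cons]
    rw [ih]

theorem pyZipStar_chunk (g : String → Int → String) (chunk : List String) (R : List Int)
    (hc : chunk ≠ []) :
    pyZipStar (chunk.map (fun s => R.map (g s)))
      = R.map (fun r => chunk.map (fun s => g s r)) := by
  cases chunk with
  | nil => exact absurd rfl hc
  | cons c cs =>
    simp only [List.map_cons, pyZipStar]
    rw [pyZipAux_maps]

-- the per-chunk band B also produces: "".join over the rows of the chunk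
def bandOf (w h_ : Int) (chunk : List String) : String :=
  PySem.Str.join "" ((PySem.List.pyRange 0 h_ 1).map (fun r =>
    PySem.Str.join " "
      (chunk.map (fun s => PySem.Str.slice s (some (w * r)) (some (w * (r + 1))))) ++ "\n"))

-- one band: A's grid+zip pipeline equals the row-major band, for a nonempty chunk
theorem band_eq (chunk : List String) (w h_ : Int) (hc : chunk ≠ []) :
    (pyZipStar (chunk.foldl (fun acc state => acc ++ [create2D state w h_]) [])).foldl
        (fun band tup => band ++ PySem.Str.join " " tup ++ "\n") ""
      = bandOf w h_ chunk := by
  rw [foldl_append_singleton]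
  simp only [List.nil_append]
  rw [show (fun state => create2D state w h_)
        = (fun s => (PySem.List.pyRange 0 h_ 1).map
            (fun r => PySem.Str.slice s (some (w * r)) (some (w * (r + 1))))) from rfl]
  rw [pyZipStar_chunk (fun s r => PySem.Str.slice s (some (w * r)) (some (w * (r + 1)))) chunk _ hc]
  have hbody : (fun (band : String) tup => band ++ PySem.Str.join " " tup ++ "\n")
      = (fun band tup => band ++ (PySem.Str.join " " tup ++ "\n")) := by
    funext b t; exact String.append_assoc
  rw [hbody, foldl_str_append]
  simp [bandOf, List.map_map, Function.comp_def]

-- A's pathList = path.split(" ") is never empty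
theorem go_ne_nil (sep : List Char) : ∀ (fuel : Nat) (l cur : List Char) (acc : List (List Char)),
    PySem.Chars.splitOn.go sep fuel l cur acc ≠ [] := by
  intro fuel
  induction fuel with
  | zero =>
    intro l cur acc
    simp [PySem.Chars.splitOn.go]
  | succ n ih =>
    intro l cur acc
    cases l with
    | nil => simp [PySem.Chars.splitOn.go]
    | cons c rest =>
      simp only [PySem.Chars.splitOn.go]
      split
      · exact ih _ _ _
      · exact ih _ _ _

theorem split_getD_ne_nil (p : String) : (PySem.Str.split? p " ").getD [] ≠ [] := by
  simp [PySem.Str.split?, PySem.Chars.split?, PySem.Chars.splitOn,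
    show (" " : String).toList = [' '] from rfl]
  exact go_ne_nil _ _ _ _ _

-- ---------- chunking ----------

-- chunks of size b (b ≥ 1): the successive size-b slices of xs
def chunks (b : Nat) : List String → List (List String)
  | [] => []
  | x :: xs => (x :: xs.take (b - 1)) :: chunks b (xs.drop (b - 1))
termination_by l => l.length
decreasing_by simp

theorem chunks_nil (b : Nat) : chunks b [] = [] := by
  rw [chunks]

theorem chunks_cons (b : Nat) (x : String) (xs : List String) :
    chunks b (x :: xs) = (x :: xs.take (b - 1)) :: chunks b (xs.drop (b - 1)) := by
  rw [chunks]

theorem chunks_ne_nil_aux (n : Nat) : ∀ (b : Nat) (xs : List String), xs.length ≤ n →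
    ∀ c ∈ chunks b xs, c ≠ [] := by
  induction n with
  | zero =>
    intro b xs hlen
    have hx : xs = [] := List.length_eq_zero_iff.mp (by omega)
    subst hx
    simp [chunks_nil]
  | succ m ih =>
    intro b xs hlen
    cases xs with
    | nil => simp [chunks_nil]
    | cons x xs =>
      intro c hc
      rw [chunks_cons] at hc
      rcases List.mem_cons.mp hc with h | h
      · simp [h]
      · exact ih b (xs.drop (b - 1)) (by simp at hlen ⊢; omega) c h

theorem chunks_ne_nil (b : Nat) (xs : List String) :
    ∀ c ∈ chunks b xs, c ≠ [] :=
  chunks_ne_nil_aux xs.length b xs le_rfl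

-- unfolding a positive-step pyRange
theorem pyRange_pos_cons (a b s : Int) (hab : a < b) (hs : 0 < s) :
    PySem.List.pyRange a b s = a :: PySem.List.pyRange (a + s) b s := by
  rw [PySem.List.pyRange_of_pos a b hs, PySem.List.pyRange_of_pos (a + s) b hs]
  have hkey : (b - a + s - 1) / s = (b - (a + s) + s - 1) / s + 1 := by
    have : b - a + s - 1 = (b - (a + s) + s - 1) + 1 * s := by ring
    rw [this, Int.add_mul_ediv_right _ _ (by omega : s ≠ 0)]
  by_cases h2 : a + s < b
  · rw [if_pos hab, if_pos h2]
    have hnn : 0 ≤ (b - (a + s) + s - 1) / s :=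
      Int.ediv_nonneg (by omega) (by omega)
    have : (b - a + s - 1) / s = ((b - (a + s) + s - 1) / s).toNat + 1 := by omega
    rw [this]
    norm_cast
    rw [List.range_succ_eq_map]
    simp only [List.map_cons, List.map_map, Function.comp_def]
    congr 1
    · push_cast; ring
    · apply List.map_congr_left
      intro k _
      push_cast
      ring
  · rw [if_pos hab, if_neg h2]
    have hz : (b - (a + s) + s - 1) / s = 0 :=
      Int.ediv_eq_zero_of_lt (by omega) (by omega)
    have : (b - a + s - 1) / s = 1 := by omega
    rw [this]
    simp

-- A's slice loop produces exactly the size-b chunks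
theorem slices_eq_chunks (xs : List String) (b : Int) (hb : 0 < b) :
    ∀ (a : Int), 0 ≤ a →
      (PySem.List.pyRange a (xs.length : Int) b).map
          (fun i => PySem.List.slice xs (some i) (some (i + b)))
        = chunks b.toNat (xs.drop a.toNat) := by
  intro a
  induction hn : ((xs.length : Int) - a).toNat using Nat.strong_induction_on generalizing a with
  | _ n ih =>
    intro ha
    by_cases hlt : a < (xs.length : Int)
    · rw [pyRange_pos_cons _ _ _ hlt hb, List.map_cons]
      have hrec := ih (((xs.length : Int) - (a + b)).toNat) (by omega) (a + b) rfl (by omega)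
      rw [hrec]
      have hdropnn : xs.drop a.toNat ≠ [] := by
        intro hnil
        have := List.drop_eq_nil_iff.mp hnil
        omega
      obtain ⟨y, ys, hys⟩ := List.exists_cons_of_ne_nil hdropnn
      rw [hys, chunks_cons]
      congr 1
      · rw [PySem.List.slice_toNat xs ha (by omega)]
        have h2 : (a + b).toNat = a.toNat + b.toNat := by omega
        rw [h2, show a.toNat + b.toNat - a.toNat = b.toNat from by omega, hys]
        obtain ⟨m, hm⟩ : ∃ m, b.toNat = m + 1 := ⟨b.toNat - 1, by omega⟩
        rw [hm]
        simp
      · have : ys.drop (b.toNat - 1) = xs.drop (a + b).toNat := by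
          have h1 : xs.drop (a + b).toNat = (xs.drop a.toNat).drop b.toNat := by
            rw [List.drop_drop]
            congr 1
            omega
          rw [h1, hys]
          cases hbn' : b.toNat with
          | zero => omega
          | succ m => simp
        rw [this]
    · have hnil1 : PySem.List.pyRange a (xs.length : Int) b = [] := by
        rw [PySem.List.pyRange_of_pos _ _ hb, if_neg hlt]
        simp
      have hnil2 : xs.drop a.toNat = [] := by
        apply List.drop_eq_nil_iff.mpr
        omega
      rw [hnil1, hnil2, chunks_nil]
      simp

-- ---------- B's streaming loop ----------

-- the inner 'for r in range(h)' update as a function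
def innerUpd (w h_ : Int) (rs : List (List String)) (state : String) : List (List String) :=
  (PySem.List.pyRange 0 h_ 1).foldl
    (fun rs r => rs.set r.toNat
      ((rs.getD r.toNat []) ++ [PySem.Str.slice state (some (w * r)) (some (w * (r + 1)))]))
    rs

-- the row buffers after a chunk of states has been streamed in
def rowsOf (w h_ : Int) (chunk : List String) : List (List String) :=
  (PySem.List.pyRange 0 h_ 1).map (fun r =>
    chunk.map (fun s => PySem.Str.slice s (some (w * r)) (some (w * (r + 1)))))

-- a left fold of head-preserving steps keeps the head
theorem foldl_cons_lift {α β : Type} (F : List α → β → List α) (G : List α → β → List α)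
    (hFG : ∀ y t k, F (y :: t) k = y :: G t k) (l : List β) (y : α) (t : List α) :
    l.foldl F (y :: t) = y :: l.foldl G t := by
  induction l generalizing t with
  | nil => rfl
  | cons k l ih => rw [List.foldl_cons, List.foldl_cons, hFG, ih]

-- folding index-wise set/append over range n on a length-n list is mapIdx
theorem foldl_set_range (n : Nat) (u : Nat → String) (rs : List (List String))
    (hlen : rs.length = n) :
    (List.range n).foldl (fun a k => a.set k ((a.getD k []) ++ [u k])) rs
      = rs.mapIdx (fun k x => x ++ [u k]) := by
  induction n generalizing rs u with
  | zero =>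
    cases rs with
    | nil => simp
    | cons y t => simp at hlen
  | succ m ih =>
    cases rs with
    | nil => simp at hlen
    | cons y t =>
      rw [List.range_succ_eq_map, List.foldl_cons]
      have h0 : (y :: t).set 0 (((y :: t).getD 0 []) ++ [u 0]) = (y ++ [u 0]) :: t := by
        simp [List.getD]
      rw [h0, List.foldl_map]
      rw [foldl_cons_lift _ (fun a k => a.set k ((a.getD k []) ++ [u (k + 1)]))
        (by intro y' t' k; simp [List.getD]) _ _ _]
      rw [ih (fun k => u (k + 1)) t (by simpa using hlen)]
      simp [List.mapIdx_cons]

-- mapIdx of an appended column over a range-map is the pointwise map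
theorem mapIdx_map_range (n : Nat) (f : Nat → List String) (u : Nat → String) :
    ((List.range n).map f).mapIdx (fun k x => x ++ [u k])
      = (List.range n).map (fun k => f k ++ [u k]) := by
  apply List.ext_getElem
  · simp
  · intro k h1 h2
    simp

-- pyRange 0 h 1 as a Nat range
theorem pyRange_zero_eq_range (h_ : Int) :
    PySem.List.pyRange 0 h_ 1 = (List.range h_.toNat).map (fun (k : Nat) => (k : Int)) := by
  rw [PySem.List.pyRange_of_pos 0 h_ (by omega : (0:Int) < 1)]
  by_cases h : (0:Int) < h_
  · rw [if_pos h, show (h_ - 0 + 1 - 1) / 1 = h_ from by omega]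
    simp only [zero_add, one_mul]
  · rw [if_neg h, show h_.toNat = 0 from by omega]
    simp

-- one streamed state extends every row buffer
theorem innerUpd_rowsOf (w h_ : Int) (chunk : List String) (s : String) :
    innerUpd w h_ (rowsOf w h_ chunk) s = rowsOf w h_ (chunk ++ [s]) := by
  unfold innerUpd rowsOf
  rw [pyRange_zero_eq_range]
  simp only [List.map_map, Function.comp_def, List.foldl_map]
  have hcast : ∀ (k : Nat), ((k : Int)).toNat = k := fun k => Int.toNat_natCast k
  simp only [hcast]
  rw [foldl_set_range h_.toNat
    (fun k => PySem.Str.slice s (some (w * (k : Int))) (some (w * ((k : Int) + 1))))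
    _ (by simp)]
  rw [mapIdx_map_range]
  simp [List.map_append]

theorem mkRows_eq_rowsOf (w h_ : Int) : mkRows h_ = rowsOf w h_ [] := rfl

theorem flushRows_rowsOf (w h_ : Int) (chunk : List String) :
    flushRows (rowsOf w h_ chunk) = bandOf w h_ chunk := by
  simp [flushRows, rowsOf, bandOf, List.map_map, Function.comp_def]

-- the chunks formed by continuing to fill the current buffer c
def chunksFrom (b : Nat) (c : List String) : List String → List (List String)
  | [] => [c]
  | x :: xs => if c.length = b then c :: chunksFrom b [x] xs else chunksFrom b (c ++ [x]) xs

theorem chunksFrom_eq_chunks (b : Nat) :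
    ∀ (xs c : List String), c ≠ [] → c.length ≤ b →
      chunksFrom b c xs
        = (c ++ xs.take (b - c.length)) :: chunks b (xs.drop (b - c.length)) := by
  intro xs
  induction xs with
  | nil =>
    intro c hc hb
    simp [chunksFrom, chunks_nil]
  | cons x xs ih =>
    intro c hc hb
    rw [chunksFrom]
    by_cases hcb : c.length = b
    · rw [if_pos hcb]
      rw [ih [x] (by simp) (by have := List.length_pos_of_ne_nil hc; simp only [List.length_cons, List.length_nil]; omega)]
      rw [show b - c.length = 0 from by omega]
      simp only [List.take_zero, List.append_nil, List.drop_zero]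
      rw [chunks_cons]
      simp
    · rw [if_neg hcb]
      rw [ih (c ++ [x]) (by simp) (by simp; omega)]
      have h1 : b - c.length = (b - (c ++ [x]).length) + 1 := by simp; omega
      rw [h1]
      simp [List.take_succ_cons, List.drop_succ_cons, List.append_assoc]

-- the step function of B's fold
def stepB (w h_ b : Int) (acc : List String × List (List String) × Int) (state : String) :
    List String × List (List String) × Int :=
  let acc2 := if acc.2.2 == b then (acc.1 ++ [flushRows acc.2.1], mkRows h_, (0 : Int)) else acc
  (acc2.1, innerUpd w h_ acc2.2.1 state, acc2.2.2 + 1)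

-- invariant of B's streaming fold (positive b)
theorem fold_inv (w h_ b : Int) (hb : 0 < b) :
    ∀ (xs : List String) (bands : List String) (c : List String), c.length ≤ b.toNat →
      (let r := xs.foldl (stepB w h_ b) (bands, rowsOf w h_ c, (c.length : Int))
       r.1 ++ [flushRows r.2.1])
        = bands ++ (chunksFrom b.toNat c xs).map (bandOf w h_) := by
  intro xs
  induction xs with
  | nil =>
    intro bands c hlen
    simp [chunksFrom, flushRows_rowsOf]
  | cons x xs ih =>
    intro bands c hlen
    simp only [List.foldl_cons]
    by_cases hcb : (c.length : Int) = b
    · have hstep : stepB w h_ b (bands, rowsOf w h_ c, (c.length : Int)) x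
          = (bands ++ [bandOf w h_ c], rowsOf w h_ [x], (1 : Int)) := by
        simp only [stepB, beq_iff_eq, hcb]
        rw [if_pos trivial]
        rw [mkRows_eq_rowsOf w h_, innerUpd_rowsOf, flushRows_rowsOf]
        simp
      have h := ih (bands ++ [bandOf w h_ c]) [x] (by simp only [List.length_cons, List.length_nil]; omega)
      simp only [List.length_cons, List.length_nil, zero_add, Nat.cast_one] at h
      rw [hstep, h, chunksFrom, if_pos (by omega)]
      simp
    · have hstep : stepB w h_ b (bands, rowsOf w h_ c, (c.length : Int)) x
          = (bands, rowsOf w h_ (c ++ [x]), (c.length : Int) + 1) := by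
        simp only [stepB, beq_iff_eq, if_neg hcb]
        rw [innerUpd_rowsOf]
      have h := ih bands (c ++ [x]) (by simp; omega)
      simp only [List.length_append, List.length_cons, List.length_nil, Nat.cast_add,
        Nat.cast_one, zero_add] at h
      rw [hstep, h, chunksFrom, if_neg (by omega)]

-- with c = [x], chunksFrom restarts exactly the plain chunking
theorem chunksFrom_nil_start (b : Nat) (hb : 1 ≤ b) (x : String) (xs : List String) :
    chunksFrom b [x] xs = chunks b (x :: xs) := by
  rw [chunksFrom_eq_chunks b xs [x] (by simp) (by simp only [List.length_cons, List.length_nil]; omega), chunks_cons]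
  simp

-- B's body, written with the named step function
theorem getBand_alt_eq (path : String) (w h_ b : Int) :
    getBand_alt path w h_ b
      = PySem.Str.join "\n"
          ((((PySem.Str.split? path " ").getD []).foldl (stepB w h_ b) ([], mkRows h_, 0)).1
            ++ [flushRows
                 (((PySem.Str.split? path " ").getD []).foldl (stepB w h_ b)
                   ([], mkRows h_, 0)).2.1]) := by
  rfl

-- ===== VERDICT (by name: the statement is the Claim_ definition above) =====
theorem getBand_spec : Claim_equal_getBand := by
  intro path w h_ b _ hpre
  have hb : (0 : Int) < b := by exact_mod_cast hpre
  unfold Spec_getBand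
  have hxs := split_getD_ne_nil path
  obtain ⟨x, xs, hx⟩ := List.exists_cons_of_ne_nil hxs
  -- A = join "\n" (map bandOf (chunks …))
  have hA : getBand path w h_ b
      = PySem.Str.join "\n"
          ((chunks b.toNat ((PySem.Str.split? path " ").getD [])).map (bandOf w h_)) := by
    simp only [getBand]
    congr 1
    rw [foldl_append_singleton
      (fun i =>
        (pyZipStar ((PySem.List.slice ((PySem.Str.split? path " ").getD []) (some i)
            (some (i + b))).foldl (fun acc state => acc ++ [create2D state w h_]) [])).foldl
          (fun band tup => band ++ PySem.Str.join " " tup ++ "\n") "")]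
    simp only [List.nil_append]
    have hsl := slices_eq_chunks ((PySem.Str.split? path " ").getD []) b hb 0 le_rfl
    simp only [List.drop_zero, Int.toNat_zero] at hsl
    calc (PySem.List.pyRange 0 (((PySem.Str.split? path " ").getD []).length : Int) b).map
          (fun i =>
            (pyZipStar ((PySem.List.slice ((PySem.Str.split? path " ").getD []) (some i)
                (some (i + b))).foldl (fun acc state => acc ++ [create2D state w h_]) [])).foldl
              (fun band tup => band ++ PySem.Str.join " " tup ++ "\n") "")
        = ((PySem.List.pyRange 0 (((PySem.Str.split? path " ").getD []).length : Int) b).map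
            (fun i => PySem.List.slice ((PySem.Str.split? path " ").getD []) (some i)
              (some (i + b)))).map
            (fun c => (pyZipStar (c.foldl (fun acc state => acc ++ [create2D state w h_]) [])).foldl
              (fun band tup => band ++ PySem.Str.join " " tup ++ "\n") "") := by
          rw [List.map_map]; rfl
      _ = (chunks b.toNat ((PySem.Str.split? path " ").getD [])).map (bandOf w h_) := by
          rw [hsl]
          apply List.map_congr_left
          intro c hc
          exact band_eq c w h_ (chunks_ne_nil _ _ c hc)
  -- B = the same
  rw [hA, getBand_alt_eq]
  have hinv := fold_inv w h_ b hb ((PySem.Str.split? path " ").getD []) [] []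
    (by simp)
  rw [show rowsOf w h_ [] = mkRows h_ from (mkRows_eq_rowsOf w h_).symm] at hinv
  simp only [List.length_nil, Int.natCast_zero, List.nil_append] at hinv
  rw [hinv]
  rw [hx, chunksFrom, if_neg (by simp; omega), List.nil_append,
    chunksFrom_nil_start b.toNat (by omega) x xs]
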